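-- pv_equiv track=rewrite | github.com/nelsonlai/freelance | leetcode/leetcode_problems/codes/1950_maximum-of-minimum-values-in-all-subarrays/python3.py | findMaximums
-- ===== SOURCE A (Python) =====
-- from typing import List
--
-- def findMaximums(nums: List[int]) -> List[int]:
--     n = len(nums)
--     result = [0] * n
--     left = [-1] * n
--     right = [n] * n
--     stack = []
--
--     # Find left boundaries
--     for i in range(n):
--         while stack and nums[stack[-1]] >= nums[i]:
--             stack.pop()
--         if stack:
--             left[i] = stack[-1]
--         stack.append(i)
--
--     stack = []
--     # Find right boundaries
--     for i in range(n - 1, -1, -1):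
--         while stack and nums[stack[-1]] >= nums[i]:
--             stack.pop()
--         if stack:
--             right[i] = stack[-1]
--         stack.append(i)
--
--     # Update result
--     for i in range(n):
--         length = right[i] - left[i] - 1
--         result[length - 1] = max(result[length - 1], nums[i])
--
--     # Fill gaps
--     for i in range(n - 2, -1, -1):
--         result[i] = max(result[i], result[i + 1])
--
--     return result
-- ===== SOURCE B (Python) =====
-- from typing import List
--
-- def findMaximums(nums: List[int]) -> List[int]:
--     n = len(nums)
--     best = [0] * n
--     for i in range(n):
--         v = nums[i]
--         l = i - 1
--         while l >= 0 and nums[l] >= v: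
--             l -= 1
--         r = i + 1
--         while r < n and nums[r] >= v:
--             r += 1
--         span = r - l - 1
--         best[span - 1] = max(best[span - 1], v)
--     out = []
--     run = 0
--     for b in reversed(best):
--         run = max(run, b)
--         out.append(run)
--     out.reverse()
--     return out
-- ===== Notes on version B (the rewrite author's own statement) =====
-- stated objective: simpler
-- what changed: Replaces the two monotonic-stack passes and the left/right boundary arrays with a direct per-element bidirectional scan for the strictly-smaller boundaries, and replaces the in-place fill-gaps pass with a running suffix maximum built back-to-front.
import Mathlib
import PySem

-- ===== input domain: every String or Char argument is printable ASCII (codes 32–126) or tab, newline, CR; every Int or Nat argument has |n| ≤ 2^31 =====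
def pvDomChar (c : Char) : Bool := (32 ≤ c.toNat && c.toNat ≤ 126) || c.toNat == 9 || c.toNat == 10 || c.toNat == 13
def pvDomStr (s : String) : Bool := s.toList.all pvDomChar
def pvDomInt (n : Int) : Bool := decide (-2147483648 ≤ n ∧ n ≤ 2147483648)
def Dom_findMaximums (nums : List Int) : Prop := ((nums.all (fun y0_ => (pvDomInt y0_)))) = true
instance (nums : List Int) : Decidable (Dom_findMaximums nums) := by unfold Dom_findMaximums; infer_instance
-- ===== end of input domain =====

-- B replaces A's two monotonic-stack passes and boundary arrays with direct per-element
-- scans for the strictly-smaller boundaries, and replaces the in-place fill-gaps pass with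
-- a running suffix maximum built back-to-front (objective: simpler; no speed claim).

-- ===== PORT A =====
-- 'while stack and nums[stack[-1]] >= nums[i]: stack.pop()'; the stack is kept top-first
-- (Python's stack[-1] is the head here).  Indices on the stack were pushed by the loop and
-- are always in range, so 'nums[stack[-1]]' is ported as getD _ 0 (never out of range).
def pyPopWhile (nums : List Int) (v : Int) : List Nat → List Nat
  | [] => []
  | t :: rest => if v ≤ nums.getD t 0 then pyPopWhile nums v rest else t :: rest

-- length = right[i]-left[i]-1 is always ≥ 1 and length-1 < n, so Python's
-- 'result[length-1]' is ported as .set/.getD at (len-1).toNat (no negative wraparound).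
def findMaximums (nums : List Int) : List Int :=
  let n := nums.length
  let result0 := List.replicate n (0 : Int)
  let lp := (List.range n).foldl (fun (st : List Int × List Nat) i =>
      let stack := pyPopWhile nums (nums.getD i 0) st.2
      let left := match stack with
        | t :: _ => st.1.set i (t : Int)
        | [] => st.1
      (left, i :: stack)) (List.replicate n (-1 : Int), [])
  let rp := ((List.range n).reverse).foldl (fun (st : List Int × List Nat) i =>
      let stack := pyPopWhile nums (nums.getD i 0) st.2
      let right := match stack with
        | t :: _ => st.1.set i (t : Int)
        | [] => st.1
      (right, i :: stack)) (List.replicate n ((n : Nat) : Int), [])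
  let result := (List.range n).foldl (fun res i =>
      let len := rp.1.getD i 0 - lp.1.getD i 0 - 1
      res.set (len - 1).toNat (max (res.getD (len - 1).toNat 0) (nums.getD i 0))) result0
  ((List.range (n - 1)).reverse).foldl (fun res i =>
      res.set i (max (res.getD i 0) (res.getD (i + 1) 0))) result

-- ===== PORT B =====
-- 'l = i-1; while l >= 0 and nums[l] >= v: l -= 1' (returns the final l, -1 if it ran off)
def scanDown (nums : List Int) (v : Int) : Nat → Int
  | 0 => -1
  | j + 1 => if nums.getD j 0 < v then (j : Int) else scanDown nums v j

-- 'r = i+1; while r < n and nums[r] >= v: r += 1' (returns the final r, n if it ran off)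
def scanUp (nums : List Int) (v : Int) (n : Nat) (r : Nat) : Int :=
  if h : r < n then
    if nums.getD r 0 < v then (r : Int) else scanUp nums v n (r + 1)
  else (n : Int)
termination_by n - r

-- 'for b in reversed(best): run = max(run, b); out.append(run)' then one final
-- 'out.reverse()': appending then reversing once at the end is ported by accumulating
-- with cons, which builds exactly the reversed append list (exact for every input).
def findMaximums_alt (nums : List Int) : List Int :=
  let n := nums.length
  let best := (List.range n).foldl (fun best i =>
      let v := nums.getD i 0
      let l := scanDown nums v i
      let r := scanUp nums v n (i + 1)
      let span := r - l - 1
      best.set (span - 1).toNat (max (best.getD (span - 1).toNat 0) v)) (List.replicate n (0 : Int))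
  (best.reverse.foldl (fun (st : Int × List Int) b => (max st.1 b, max st.1 b :: st.2))
    ((0 : Int), ([] : List Int))).2

-- ===== PRECONDITION & SPEC =====
def Spec_findMaximums (nums : List Int) (out : List Int) : Prop := out = findMaximums_alt nums
instance (nums : List Int) (out : List Int) : Decidable (Spec_findMaximums nums out) := by unfold Spec_findMaximums; infer_instance

-- ===== CLAIM (what is proved, stated in full; the proofs are below) =====
def Claim_equal_findMaximums : Prop := ∀ (nums : List Int), Dom_findMaximums nums → Spec_findMaximums nums (findMaximums nums)

-- ===== LEMMAS AND PROOFS =====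

theorem scanDown_lt (nums : List Int) (v : Int) (j : Nat) : scanDown nums v j < (j : Int) := by
  induction j with
  | zero => simp [scanDown]
  | succ j ih =>
    rw [scanDown]
    split
    · omega
    · omega

theorem scanDown_neg_one_le (nums : List Int) (v : Int) (j : Nat) : -1 ≤ scanDown nums v j := by
  induction j with
  | zero => simp [scanDown]
  | succ j ih =>
    rw [scanDown]; split
    · omega
    · exact ih

theorem scanDown_skip (nums : List Int) (v : Int) : ∀ j m : Nat, m ≤ j →
    (∀ k, m ≤ k → k < j → v ≤ nums.getD k 0) →
    scanDown nums v j = scanDown nums v m := by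
  intro j
  induction j with
  | zero => intro m hm _; have : m = 0 := by omega
            rw [this]
  | succ j ih =>
    intro m hm h
    rcases Nat.eq_or_lt_of_le hm with h1 | h1
    · rw [h1]
    · have hj : m ≤ j := by omega
      have hgj : v ≤ nums.getD j 0 := h j hj (by omega)
      rw [scanDown, if_neg (by omega : ¬ nums.getD j 0 < v)]
      exact ih m hj (fun k hk1 hk2 => h k hk1 (by omega))

theorem scanDown_between (nums : List Int) (v : Int) (j : Nat) :
    ∀ k : Nat, scanDown nums v j < (k : Int) → k < j → v ≤ nums.getD k 0 := by
  induction j with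
  | zero => intro k _ hk; omega
  | succ j ih =>
    intro k hk1 hk2
    rw [scanDown] at hk1
    by_cases hg : nums.getD j 0 < v
    · rw [if_pos hg] at hk1; omega
    · rw [if_neg hg] at hk1
      rcases Nat.lt_or_ge k j with h | h
      · exact ih k hk1 h
      · have : k = j := by omega
        subst this; omega

theorem scanUp_of_ge (nums : List Int) (v : Int) (n r : Nat) (h : n ≤ r) :
    scanUp nums v n r = (n : Int) := by
  rw [scanUp, dif_neg (by omega : ¬ r < n)]

theorem scanUp_le (nums : List Int) (v : Int) (n : Nat) : ∀ r, scanUp nums v n r ≤ (n : Int) := by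
  intro r
  induction r using scanUp.induct nums v n with
  | case1 r h1 h2 => rw [scanUp, dif_pos h1, if_pos h2]; omega
  | case2 r h1 h2 ih => rw [scanUp, dif_pos h1, if_neg h2]; exact ih
  | case3 r h1 => rw [scanUp, dif_neg h1]

theorem scanUp_ge (nums : List Int) (v : Int) (n : Nat) : ∀ r : Nat, (r : Int) ≤ scanUp nums v n r ∨ n < r := by
  intro r
  induction r using scanUp.induct nums v n with
  | case1 r h1 h2 => left; rw [scanUp, dif_pos h1, if_pos h2]
  | case2 r h1 h2 ih =>
    left; rw [scanUp, dif_pos h1, if_neg h2]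
    rcases ih with h | h
    · omega
    · omega
  | case3 r h1 => rcases Nat.eq_or_lt_of_le (Nat.not_lt.mp h1) with h | h
                  · left; rw [scanUp, dif_neg h1]; omega
                  · right; exact h

theorem scanUp_skip (nums : List Int) (v : Int) (n : Nat) :
    ∀ r m : Nat, r ≤ m → m ≤ n → (∀ k, r ≤ k → k < m → v ≤ nums.getD k 0) →
    scanUp nums v n r = scanUp nums v n m := by
  intro r
  induction r using scanUp.induct nums v n with
  | case1 r h1 h2 =>
    intro m hrm hmn h
    rcases Nat.eq_or_lt_of_le hrm with h3 | h3
    · rw [h3]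
    · exact absurd (h r le_rfl h3) (by omega)
  | case2 r h1 h2 ih =>
    intro m hrm hmn h
    rcases Nat.eq_or_lt_of_le hrm with h3 | h3
    · rw [h3]
    · rw [scanUp, dif_pos h1, if_neg h2]
      have := scanUp_of_ge nums v n (r+1)
      exact ih m (by omega) hmn (fun k hk1 hk2 => h k (by omega) hk2)
  | case3 r h1 =>
    intro m hrm hmn h
    have : m = r := by omega
    rw [this]

theorem scanUp_between (nums : List Int) (v : Int) (n : Nat) :
    ∀ r : Nat, ∀ k : Nat, r ≤ k → (k : Int) < scanUp nums v n r → v ≤ nums.getD k 0 := by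
  intro r
  induction r using scanUp.induct nums v n with
  | case1 r h1 h2 =>
    intro k hk1 hk2
    rw [scanUp, dif_pos h1, if_pos h2] at hk2
    omega
  | case2 r h1 h2 ih =>
    intro k hk1 hk2
    rcases Nat.eq_or_lt_of_le hk1 with h3 | h3
    · subst h3; omega
    · rw [scanUp, dif_pos h1, if_neg h2] at hk2
      exact ih k h3 hk2
  | case3 r h1 =>
    intro k hk1 hk2
    rw [scanUp, dif_neg h1] at hk2
    omega

theorem scanUp_nonneg (nums : List Int) (v : Int) (n r : Nat) : 0 ≤ scanUp nums v n r := by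
  rcases scanUp_ge nums v n r with h | h
  · omega
  · rw [scanUp_of_ge nums v n r (by omega)]; omega

def descChain (nums : List Int) (j : Nat) : List Nat :=
  j :: (if _h : 0 ≤ scanDown nums (nums.getD j 0) j
        then descChain nums (scanDown nums (nums.getD j 0) j).toNat else [])
decreasing_by
  have h1 := scanDown_lt nums (nums.getD j 0) j
  omega

def optChainD (nums : List Int) (p : Int) : List Nat :=
  if 0 ≤ p then descChain nums p.toNat else []

theorem descChain_eq (nums : List Int) (j : Nat) :
    descChain nums j = j :: optChainD nums (scanDown nums (nums.getD j 0) j) := by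
  rw [descChain, optChainD, dite_eq_ite]

theorem pop_descChain (nums : List Int) (v : Int) :
    ∀ j : Nat, pyPopWhile nums v (descChain nums j) = optChainD nums (scanDown nums v (j + 1)) := by
  intro j
  induction j using Nat.strong_induction_on with
  | _ j ih =>
    rw [descChain_eq]
    by_cases hgj : nums.getD j 0 < v
    · rw [pyPopWhile, if_neg (by omega : ¬ v ≤ nums.getD j 0)]
      have h1 : scanDown nums v (j + 1) = (j : Int) := by rw [scanDown, if_pos hgj]
      rw [h1]
      conv_rhs => rw [optChainD]
      rw [if_pos (by omega : (0:Int) ≤ ((j:Nat):Int)), Int.toNat_natCast, descChain_eq]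
    · rw [pyPopWhile, if_pos (by omega : v ≤ nums.getD j 0)]
      have hstep : scanDown nums v (j + 1) = scanDown nums v j := by
        rw [scanDown, if_neg hgj]
      by_cases hp0 : 0 ≤ scanDown nums (nums.getD j 0) j
      · rw [optChainD, if_pos hp0]
        have hplt : scanDown nums (nums.getD j 0) j < (j : Int) := scanDown_lt nums _ j
        rw [ih _ (by omega)]
        rw [hstep]
        have hskip : scanDown nums v j
            = scanDown nums v ((scanDown nums (nums.getD j 0) j).toNat + 1) := by
          apply scanDown_skip nums v j _ (by omega)
          intro k hk1 hk2
          have : nums.getD j 0 ≤ nums.getD k 0 :=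
            scanDown_between nums (nums.getD j 0) j k (by omega) hk2
          omega
        rw [hskip]
      · rw [optChainD, if_neg hp0, pyPopWhile]
        have h2 : scanDown nums v j = -1 := by
          have hz : scanDown nums v j = scanDown nums v 0 := by
            apply scanDown_skip nums v j 0 (by omega)
            intro k hk1 hk2
            have h3 : nums.getD j 0 ≤ nums.getD k 0 := by
              apply scanDown_between nums (nums.getD j 0) j k _ hk2
              have := scanDown_neg_one_le nums (nums.getD j 0) j
              omega
            omega
          rw [hz, scanDown]
        rw [hstep, h2, optChainD, if_neg (by omega)]

def ascChain (nums : List Int) (n : Nat) (j : Nat) : List Nat :=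
  j :: (if _h : scanUp nums (nums.getD j 0) n (j + 1) < (n : Int) ∧ j < n
        then ascChain nums n (scanUp nums (nums.getD j 0) n (j + 1)).toNat else [])
termination_by n - j
decreasing_by
  rcases scanUp_ge nums (nums.getD j 0) n (j+1) with h1 | h1
  · have := scanUp_nonneg nums (nums.getD j 0) n (j+1)
    omega
  · have := scanUp_of_ge nums (nums.getD j 0) n (j+1) (by omega)
    omega

def optChainU (nums : List Int) (n : Nat) (p : Int) : List Nat :=
  if p < (n : Int) then ascChain nums n p.toNat else []

theorem ascChain_eq (nums : List Int) (n : Nat) (j : Nat) (hj : j < n) :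
    ascChain nums n j = j :: optChainU nums n (scanUp nums (nums.getD j 0) n (j + 1)) := by
  rw [ascChain, optChainU]
  by_cases h : scanUp nums (nums.getD j 0) n (j + 1) < (n : Int)
  · rw [dif_pos ⟨h, hj⟩, if_pos h]
  · rw [dif_neg (by tauto), if_neg h]

theorem pop_ascChain (nums : List Int) (v : Int) (n : Nat) (j : Nat) (hj : j < n) :
    pyPopWhile nums v (ascChain nums n j) = optChainU nums n (scanUp nums v n j) := by
  rw [ascChain_eq nums n j hj]
  by_cases hgj : nums.getD j 0 < v
  · rw [pyPopWhile, if_neg (by omega : ¬ v ≤ nums.getD j 0)]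
    have h1 : scanUp nums v n j = (j : Int) := by
      rw [scanUp, dif_pos hj, if_pos hgj]
    rw [h1]
    conv_rhs => rw [optChainU]
    rw [if_pos (by omega : ((j:Nat):Int) < (n:Int)), Int.toNat_natCast, ascChain_eq nums n j hj]
  · rw [pyPopWhile, if_pos (by omega : v ≤ nums.getD j 0)]
    have hstep : scanUp nums v n j = scanUp nums v n (j + 1) := by
      rw [scanUp, dif_pos hj, if_neg hgj]
    by_cases hp0 : scanUp nums (nums.getD j 0) n (j + 1) < (n : Int)
    · rw [optChainU, if_pos hp0]
      have hge : ((j:Int) + 1) ≤ scanUp nums (nums.getD j 0) n (j + 1) := by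
        rcases scanUp_ge nums (nums.getD j 0) n (j + 1) with h | h
        · push_cast at h; omega
        · omega
      have htn : (scanUp nums (nums.getD j 0) n (j + 1)).toNat < n := by omega
      rw [pop_ascChain nums v n _ htn]
      rw [hstep]
      have hskip : scanUp nums v n (j + 1)
          = scanUp nums v n (scanUp nums (nums.getD j 0) n (j + 1)).toNat := by
        apply scanUp_skip nums v n (j + 1) _ (by omega) (by omega)
        intro k hk1 hk2
        have : nums.getD j 0 ≤ nums.getD k 0 := by
          apply scanUp_between nums (nums.getD j 0) n (j + 1) k hk1
          omega
        omega
      rw [hskip]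
    · rw [optChainU, if_neg hp0, pyPopWhile]
      have hle := scanUp_le nums (nums.getD j 0) n (j + 1)
      have hnn : scanUp nums (nums.getD j 0) n (j + 1) = (n : Int) := by omega
      have h2 : scanUp nums v n (j + 1) = (n : Int) := by
        rw [scanUp_skip nums v n (j + 1) n (by omega) (by omega), scanUp_of_ge nums v n n le_rfl]
        intro k hk1 hk2
        have : nums.getD j 0 ≤ nums.getD k 0 := by
          apply scanUp_between nums (nums.getD j 0) n (j + 1) k hk1
          omega
        omega
      rw [hstep, h2, optChainU, if_neg (by omega)]
termination_by n - j
decreasing_by omega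

-- the common step of A's two boundary passes (stack kept top-first)
def stepL (nums : List Int) (st : List Int × List Nat) (i : Nat) : List Int × List Nat :=
  let stack := pyPopWhile nums (nums.getD i 0) st.2
  (match stack with
   | t :: _ => st.1.set i (t : Int)
   | [] => st.1, i :: stack)

theorem getD_set' (l : List Int) (i k : Nat) (a : Int) :
    (l.set i a).getD k 0 = if i = k ∧ i < l.length then a else l.getD k 0 := by
  by_cases h : i = k ∧ i < l.length
  · rw [if_pos h, ← h.1]
    simp [List.getD_eq_getElem?_getD, h.2]
  · rw [if_neg h]
    by_cases h1 : i = k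
    · subst h1
      have h2 : ¬ i < l.length := by tauto
      simp [List.getD_eq_getElem?_getD, h2]
    · simp [List.getD_eq_getElem?_getD, List.getElem?_set_ne h1]

theorem stepL_cons (nums : List Int) (st : List Int × List Nat) (i t : Nat) (rest : List Nat)
    (h : pyPopWhile nums (nums.getD i 0) st.2 = t :: rest) :
    stepL nums st i = (st.1.set i (t : Int), i :: t :: rest) := by
  rw [stepL, h]

theorem stepL_nil (nums : List Int) (st : List Int × List Nat) (i : Nat)
    (h : pyPopWhile nums (nums.getD i 0) st.2 = []) :
    stepL nums st i = (st.1, [i]) := by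
  rw [stepL, h]

theorem left_inv (nums : List Int) (n : Nat) : ∀ i : Nat,
    ((List.range i).foldl (stepL nums) (List.replicate n (-1 : Int), [])).2
      = (match i with | 0 => [] | j+1 => descChain nums j) ∧
    ((List.range i).foldl (stepL nums) (List.replicate n (-1 : Int), [])).1.length = n ∧
    (∀ k, k < n → ((List.range i).foldl (stepL nums) (List.replicate n (-1 : Int), [])).1.getD k 0
      = if k < i then scanDown nums (nums.getD k 0) k else -1) := by
  intro i
  induction i with
  | zero =>
    refine ⟨rfl, by simp, ?_⟩
    intro k hk
    simp [List.getD_eq_getElem?_getD, hk]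
  | succ i ih =>
    obtain ⟨hstk, hlen, harr⟩ := ih
    rw [List.range_succ, List.foldl_append, List.foldl_cons, List.foldl_nil]
    set st := (List.range i).foldl (stepL nums) (List.replicate n (-1 : Int), []) with hst
    have hpop : pyPopWhile nums (nums.getD i 0) st.2
        = optChainD nums (scanDown nums (nums.getD i 0) i) := by
      rw [hstk]
      match i with
      | 0 => rw [pyPopWhile, scanDown, optChainD, if_neg (by omega)]
      | j+1 => exact pop_descChain nums (nums.getD (j+1) 0) j
    by_cases hp : 0 ≤ scanDown nums (nums.getD i 0) i
    · -- stack nonempty after pop; left[i] is set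
      have hcons : pyPopWhile nums (nums.getD i 0) st.2
          = (scanDown nums (nums.getD i 0) i).toNat
            :: optChainD nums (scanDown nums
                 (nums.getD (scanDown nums (nums.getD i 0) i).toNat 0)
                 (scanDown nums (nums.getD i 0) i).toNat) := by
        rw [hpop, optChainD, if_pos hp, descChain_eq]
      rw [stepL_cons nums st i _ _ hcons]
      refine ⟨?_, ?_, ?_⟩
      · show _ :: _ = descChain nums i
        rw [descChain_eq]
        conv_rhs => rw [optChainD, if_pos hp, descChain_eq]
      · show (st.1.set i _).length = n
        rw [List.length_set]; exact hlen
      · intro k hk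
        show (st.1.set i ((scanDown nums (nums.getD i 0) i).toNat : Int)).getD k 0 = _
        rw [getD_set' st.1 i k _, hlen]
        by_cases hik : i = k
        · subst hik
          rw [if_pos ⟨rfl, hk⟩, if_pos (by omega), Int.toNat_of_nonneg hp]
        · rw [if_neg (fun hc => hik hc.1), harr k hk]
          by_cases hki : k < i
          · rw [if_pos hki, if_pos (by omega)]
          · rw [if_neg hki, if_neg (by omega)]
    · -- stack empty after pop; left[i] keeps -1
      have hval : scanDown nums (nums.getD i 0) i = -1 := by
        have := scanDown_neg_one_le nums (nums.getD i 0) i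
        omega
      have hnil : pyPopWhile nums (nums.getD i 0) st.2 = [] := by
        rw [hpop, optChainD, if_neg hp]
      rw [stepL_nil nums st i hnil]
      refine ⟨?_, ?_, ?_⟩
      · show [i] = descChain nums i
        rw [descChain_eq, hval, optChainD, if_neg (by omega)]
      · exact hlen
      · intro k hk
        show st.1.getD k 0 = _
        rw [harr k hk]
        by_cases hik : i = k
        · subst hik
          rw [if_neg (by omega), if_pos (by omega), hval]
        · by_cases hki : k < i
          · rw [if_pos hki, if_pos (by omega)]
          · rw [if_neg hki, if_neg (by omega)]

theorem right_inv (nums : List Int) (n : Nat) : ∀ i : Nat, i ≤ n →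
    ∀ st : List Int × List Nat,
    st.2 = (if i < n then ascChain nums n i else []) →
    st.1.length = n →
    (∀ k, k < n → st.1.getD k 0 = if i ≤ k then scanUp nums (nums.getD k 0) n (k+1) else (n:Int)) →
    (((List.range i).reverse).foldl (stepL nums) st).1.length = n ∧
    ∀ k, k < n → (((List.range i).reverse).foldl (stepL nums) st).1.getD k 0
      = scanUp nums (nums.getD k 0) n (k+1) := by
  intro i
  induction i with
  | zero =>
    intro _ st _ hlen harr
    refine ⟨hlen, ?_⟩
    intro k hk
    have := harr k hk
    rw [if_pos (by omega)] at this
    exact this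
  | succ i ih =>
    intro hin st hstk hlen harr
    have hrev : (List.range (i+1)).reverse = i :: (List.range i).reverse := by
      rw [List.range_succ, List.reverse_append]
      rfl
    rw [hrev, List.foldl_cons]
    have hpop : pyPopWhile nums (nums.getD i 0) st.2
        = optChainU nums n (scanUp nums (nums.getD i 0) n (i+1)) := by
      rcases Nat.lt_or_ge (i+1) n with h | h
      · rw [hstk, if_pos h]
        exact pop_ascChain nums (nums.getD i 0) n (i+1) h
      · have h1 : i + 1 = n := by omega
        rw [hstk, if_neg (by omega), pyPopWhile, h1,
          scanUp_of_ge nums (nums.getD i 0) n n le_rfl, optChainU, if_neg (by omega)]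
    by_cases hq : scanUp nums (nums.getD i 0) n (i+1) < (n : Int)
    · have hnn := scanUp_nonneg nums (nums.getD i 0) n (i+1)
      have htn : (scanUp nums (nums.getD i 0) n (i+1)).toNat < n := by omega
      have hcons : pyPopWhile nums (nums.getD i 0) st.2
          = (scanUp nums (nums.getD i 0) n (i+1)).toNat
            :: optChainU nums n (scanUp nums
                 (nums.getD (scanUp nums (nums.getD i 0) n (i+1)).toNat 0) n
                 ((scanUp nums (nums.getD i 0) n (i+1)).toNat + 1)) := by
        rw [hpop, optChainU, if_pos hq, ascChain_eq nums n _ htn]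
      rw [stepL_cons nums st i _ _ hcons]
      apply ih (by omega)
      · show _ :: _ = _
        rw [if_pos (by omega : i < n), ascChain_eq nums n i (by omega)]
        conv_rhs => rw [optChainU, if_pos hq, ascChain_eq nums n _ htn]
      · show (st.1.set i _).length = n
        rw [List.length_set]; exact hlen
      · intro k hk
        show (st.1.set i ((scanUp nums (nums.getD i 0) n (i+1)).toNat : Int)).getD k 0 = _
        rw [getD_set' st.1 i k _, hlen]
        by_cases hik : i = k
        · subst hik
          rw [if_pos ⟨rfl, hk⟩, if_pos (by omega), Int.toNat_of_nonneg hnn]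
        · rw [if_neg (fun hc => hik hc.1), harr k hk]
          by_cases hki : i ≤ k
          · rw [if_pos (by omega), if_pos (by omega)]
          · rw [if_neg (by omega), if_neg (by omega)]
    · have hval : scanUp nums (nums.getD i 0) n (i+1) = (n : Int) := by
        have := scanUp_le nums (nums.getD i 0) n (i+1)
        omega
      have hnil : pyPopWhile nums (nums.getD i 0) st.2 = [] := by
        rw [hpop, optChainU, if_neg hq]
      rw [stepL_nil nums st i hnil]
      apply ih (by omega)
      · show [i] = _
        rw [if_pos (by omega : i < n), ascChain_eq nums n i (by omega), hval, optChainU,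
          if_neg (by omega)]
      · exact hlen
      · intro k hk
        show st.1.getD k 0 = _
        rw [harr k hk]
        by_cases hik : i = k
        · subst hik
          rw [if_neg (by omega), if_pos (by omega), hval]
        · by_cases hki : i ≤ k
          · rw [if_pos (by omega), if_pos (by omega)]
          · rw [if_neg (by omega), if_neg (by omega)]

-- suffix maxima (seeded with 0), the common value of A's fill-gaps pass and B's backward pass
def sufT : List Int → List Int
  | [] => []
  | x :: xs => max x ((sufT xs).headD 0) :: sufT xs

theorem length_sufT (l : List Int) : (sufT l).length = l.length := by
  induction l with
  | nil => rfl
  | cons x xs ih => rw [sufT]; simpa using ih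

theorem headD_eq_getD (l : List Int) (d : Int) : l.headD d = l.getD 0 d := by
  cases l <;> rfl

theorem sufT_getD (l : List Int) : ∀ i : Nat, i < l.length →
    (sufT l).getD i 0 = max (l.getD i 0) ((sufT l).getD (i+1) 0) := by
  induction l with
  | nil => intro i hi; simp at hi
  | cons x xs ih =>
    intro i hi
    cases i with
    | zero =>
      show (sufT (x :: xs)).getD 0 0 = max ((x :: xs).getD 0 0) ((sufT (x :: xs)).getD 1 0)
      rw [sufT]
      show max x ((sufT xs).headD 0) = max x ((sufT xs).getD 0 0)
      rw [headD_eq_getD]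
    | succ i =>
      show (sufT (x :: xs)).getD (i+1) 0 = max ((x :: xs).getD (i+1) 0) ((sufT (x :: xs)).getD (i+2) 0)
      rw [sufT]
      show (sufT xs).getD i 0 = max (xs.getD i 0) ((sufT xs).getD (i+1) 0)
      exact ih i (by simpa using hi)

theorem revfold_sufT (l : List Int) :
    l.reverse.foldl (fun (st : Int × List Int) b => (max st.1 b, max st.1 b :: st.2))
      ((0 : Int), ([] : List Int)) = ((sufT l).headD 0, sufT l) := by
  induction l with
  | nil => rfl
  | cons x xs ih =>
    rw [List.reverse_cons, List.foldl_append, ih, List.foldl_cons, List.foldl_nil, sufT]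
    show (max ((sufT xs).headD 0) x, max ((sufT xs).headD 0) x :: sufT xs) = _
    rw [max_comm]
    rfl

theorem fill_mid (l : List Int) : ∀ i : Nat, i < l.length →
    ((List.range i).reverse).foldl
      (fun res k => res.set k (max (res.getD k 0) (res.getD (k+1) 0)))
      (l.take i ++ (sufT l).drop i) = sufT l := by
  intro i
  induction i with
  | zero => simp
  | succ i ih =>
    intro hi
    have hi' : i < l.length := by omega
    have hrev : (List.range (i+1)).reverse = i :: (List.range i).reverse := by
      rw [List.range_succ, List.reverse_append]; rfl
    rw [hrev, List.foldl_cons]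
    have hlen : (l.take (i+1)).length = i + 1 := by
      rw [List.length_take]; omega
    have hg1 : (l.take (i+1) ++ (sufT l).drop (i+1)).getD i 0 = l.getD i 0 := by
      rw [List.getD_eq_getElem?_getD, List.getElem?_append_left (by omega),
        List.getElem?_take_of_lt (by omega)]
      rw [List.getD_eq_getElem?_getD]
    have hg2 : (l.take (i+1) ++ (sufT l).drop (i+1)).getD (i+1) 0 = (sufT l).getD (i+1) 0 := by
      rw [List.getD_eq_getElem?_getD, List.getElem?_append_right (by omega), hlen]
      simp [List.getElem?_drop, List.getD_eq_getElem?_getD]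
    have hset : (l.take (i+1) ++ (sufT l).drop (i+1)).set i ((sufT l).getD i 0)
        = l.take i ++ (sufT l).drop i := by
      have ht : l.take (i+1) = l.take i ++ [l.getD i 0] := by
        rw [List.take_add_one]
        congr 1
        rw [List.getD_eq_getElem?_getD, List.getElem?_eq_getElem hi']
        rfl
      have hd : (sufT l).drop i = (sufT l).getD i 0 :: (sufT l).drop (i+1) := by
        have hlt : i < (sufT l).length := by rw [length_sufT]; omega
        rw [List.getD_eq_getElem?_getD, List.getElem?_eq_getElem hlt]
        exact List.drop_eq_getElem_cons hlt
      rw [ht, List.append_assoc, List.set_append]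
      rw [if_neg (by rw [List.length_take]; omega)]
      have : i - (l.take i).length = 0 := by rw [List.length_take]; omega
      rw [this]
      rw [hd]
      simp
    rw [hg1, hg2, ← sufT_getD l i hi', hset]
    exact ih hi'

theorem fill_sufT (l : List Int) (h : ∀ x ∈ l, 0 ≤ x) :
    ((List.range (l.length - 1)).reverse).foldl
      (fun res k => res.set k (max (res.getD k 0) (res.getD (k+1) 0))) l = sufT l := by
  rcases List.eq_nil_or_concat' l with rfl | ⟨l', a, rfl⟩
  · rfl
  · set L := l' ++ [a] with hL
    have hlen : L.length = l'.length + 1 := by rw [hL, List.length_append]; rfl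
    have hmid : L.take (L.length - 1) ++ (sufT L).drop (L.length - 1) = L := by
      have hlast : (sufT L).drop (L.length - 1) = [L.getD (L.length - 1) 0] := by
        have h1 : L.length - 1 < (sufT L).length := by rw [length_sufT]; omega
        rw [List.drop_eq_getElem_cons h1]
        have h2 : (sufT L).drop (L.length - 1 + 1) = [] := by
          apply List.drop_eq_nil_of_le
          rw [length_sufT]; omega
        rw [h2]
        have h3 : (sufT L)[L.length - 1] = (sufT L).getD (L.length - 1) 0 := by
          rw [List.getD_eq_getElem?_getD, List.getElem?_eq_getElem h1]; rfl
      -- last entry of sufT L is max(last of L, 0) = last of L by nonnegativity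
        rw [h3, sufT_getD L (L.length - 1) (by omega)]
        have h4 : (sufT L).getD (L.length - 1 + 1) 0 = 0 := by
          rw [List.getD_eq_getElem?_getD, List.getElem?_eq_none]
          · rfl
          · rw [length_sufT]; omega
        have h5 : 0 ≤ L.getD (L.length - 1) 0 := by
          apply h
          rw [List.getD_eq_getElem?_getD, List.getElem?_eq_getElem (by omega : L.length - 1 < L.length)]
          exact List.getElem_mem _
        rw [h4]
        congr 1
        omega
      rw [hlast]
      have h6 : L.getD (L.length - 1) 0 = L[L.length - 1]'(by omega) := by
        rw [List.getD_eq_getElem?_getD, List.getElem?_eq_getElem (by omega : L.length - 1 < L.length)]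
        rfl
      rw [h6]
      have h7 : L.take (L.length - 1) ++ [L[L.length - 1]'(by omega)] = L.take (L.length - 1 + 1) := by
        rw [← List.concat_eq_append]
        exact List.take_concat_get ..
      rw [h7]
      have : L.length - 1 + 1 = L.length := by omega
      rw [this, List.take_length]
    have hfin := fill_mid L (L.length - 1) (by omega)
    rw [hmid] at hfin
    exact hfin

theorem foldl_ext' {α β : Type} (f g : α → β → α) (L : List β)
    (h : ∀ acc, ∀ i ∈ L, f acc i = g acc i) : ∀ acc, L.foldl f acc = L.foldl g acc := by
  induction L with
  | nil => intro acc; rfl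
  | cons x xs ih =>
    intro acc
    rw [List.foldl_cons, List.foldl_cons, h acc x List.mem_cons_self]
    exact ih (fun acc i hi => h acc i (List.mem_cons_of_mem x hi)) _

theorem getD_nonneg (l : List Int) (h : ∀ x ∈ l, 0 ≤ x) (k : Nat) : 0 ≤ l.getD k 0 := by
  rw [List.getD_eq_getElem?_getD]
  cases h' : l[k]? with
  | none => simp
  | some y =>
    have : y ∈ l := List.mem_of_getElem? h'
    simpa using h y this

theorem foldl_set_max_nonneg (idx : Nat → Nat) (v : Nat → Int) :
    ∀ (L : List Nat) (acc : List Int), (∀ x ∈ acc, 0 ≤ x) →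
    ∀ x ∈ L.foldl (fun best i => best.set (idx i) (max (best.getD (idx i) 0) (v i))) acc, 0 ≤ x := by
  intro L
  induction L with
  | nil => intro acc hacc; simpa using hacc
  | cons j js ih =>
    intro acc hacc
    rw [List.foldl_cons]
    apply ih
    intro x hx
    rcases List.mem_or_eq_of_mem_set hx with h | h
    · exact hacc x h
    · rw [h]
      have := getD_nonneg acc hacc (idx j)
      omega

theorem foldl_set_length (idx : Nat → Nat) (valf : List Int → Nat → Int) :
    ∀ (L : List Nat) (acc : List Int),
    (L.foldl (fun best i => best.set (idx i) (valf best i)) acc).length = acc.length := by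
  intro L
  induction L with
  | nil => intro acc; rfl
  | cons j js ih =>
    intro acc
    rw [List.foldl_cons, ih, List.length_set]


theorem ports_eq (nums : List Int) : findMaximums nums = findMaximums_alt nums := by
  have hA : findMaximums nums =
      ((List.range (nums.length - 1)).reverse).foldl
        (fun res k => res.set k (max (res.getD k 0) (res.getD (k + 1) 0)))
        ((List.range nums.length).foldl (fun res i =>
          res.set (((((List.range nums.length).reverse).foldl (stepL nums)
                (List.replicate nums.length ((nums.length : Nat) : Int), [])).1.getD i 0
              - ((List.range nums.length).foldl (stepL nums)
                (List.replicate nums.length (-1 : Int), [])).1.getD i 0 - 1 - 1).toNat)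
            (max (res.getD (((((List.range nums.length).reverse).foldl (stepL nums)
                (List.replicate nums.length ((nums.length : Nat) : Int), [])).1.getD i 0
              - ((List.range nums.length).foldl (stepL nums)
                (List.replicate nums.length (-1 : Int), [])).1.getD i 0 - 1 - 1).toNat) 0)
              (nums.getD i 0)))
          (List.replicate nums.length (0 : Int))) := rfl
  have hB : findMaximums_alt nums =
      (((List.range nums.length).foldl (fun best i =>
          best.set ((scanUp nums (nums.getD i 0) nums.length (i + 1)
              - scanDown nums (nums.getD i 0) i - 1 - 1).toNat)
            (max (best.getD ((scanUp nums (nums.getD i 0) nums.length (i + 1)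
              - scanDown nums (nums.getD i 0) i - 1 - 1).toNat) 0) (nums.getD i 0)))
        (List.replicate nums.length (0 : Int))).reverse.foldl
        (fun (st : Int × List Int) b => (max st.1 b, max st.1 b :: st.2))
        ((0 : Int), ([] : List Int))).2 := rfl
  obtain ⟨-, hLlen, hL⟩ := left_inv nums nums.length nums.length
  obtain ⟨hRlen, hR⟩ := right_inv nums nums.length nums.length le_rfl
      (List.replicate nums.length ((nums.length : Nat) : Int), [])
      (by rw [if_neg (lt_irrefl _)]) (by simp)
      (fun k hk => by
        rw [if_neg (by omega)]
        simp [List.getD_eq_getElem?_getD, hk])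
  -- the two bucket folds coincide
  have hbucket : (List.range nums.length).foldl (fun res i =>
          res.set (((((List.range nums.length).reverse).foldl (stepL nums)
                (List.replicate nums.length ((nums.length : Nat) : Int), [])).1.getD i 0
              - ((List.range nums.length).foldl (stepL nums)
                (List.replicate nums.length (-1 : Int), [])).1.getD i 0 - 1 - 1).toNat)
            (max (res.getD (((((List.range nums.length).reverse).foldl (stepL nums)
                (List.replicate nums.length ((nums.length : Nat) : Int), [])).1.getD i 0
              - ((List.range nums.length).foldl (stepL nums)
                (List.replicate nums.length (-1 : Int), [])).1.getD i 0 - 1 - 1).toNat) 0)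
              (nums.getD i 0)))
          (List.replicate nums.length (0 : Int))
      = (List.range nums.length).foldl (fun best i =>
          best.set ((scanUp nums (nums.getD i 0) nums.length (i + 1)
              - scanDown nums (nums.getD i 0) i - 1 - 1).toNat)
            (max (best.getD ((scanUp nums (nums.getD i 0) nums.length (i + 1)
              - scanDown nums (nums.getD i 0) i - 1 - 1).toNat) 0) (nums.getD i 0)))
        (List.replicate nums.length (0 : Int)) := by
    apply foldl_ext'
    intro acc i hi
    have hin : i < nums.length := List.mem_range.mp hi
    have h1 := hL i hin
    rw [if_pos hin] at h1
    have h2 := hR i hin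
    rw [h1, h2]
  rw [hA, hB, hbucket, revfold_sufT]
  set B := (List.range nums.length).foldl (fun best i =>
          best.set ((scanUp nums (nums.getD i 0) nums.length (i + 1)
              - scanDown nums (nums.getD i 0) i - 1 - 1).toNat)
            (max (best.getD ((scanUp nums (nums.getD i 0) nums.length (i + 1)
              - scanDown nums (nums.getD i 0) i - 1 - 1).toNat) 0) (nums.getD i 0)))
        (List.replicate nums.length (0 : Int)) with hBdef
  have hnn : ∀ x ∈ B, 0 ≤ x := by
    apply foldl_set_max_nonneg
      (fun i => (scanUp nums (nums.getD i 0) nums.length (i + 1)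
        - scanDown nums (nums.getD i 0) i - 1 - 1).toNat)
      (fun i => nums.getD i 0)
    intro x hx
    rw [List.eq_of_mem_replicate hx]
  have hblen : B.length = nums.length := by
    rw [hBdef]
    rw [foldl_set_length
      (fun i => (scanUp nums (nums.getD i 0) nums.length (i + 1)
        - scanDown nums (nums.getD i 0) i - 1 - 1).toNat)
      (fun best i => max (best.getD ((scanUp nums (nums.getD i 0) nums.length (i + 1)
        - scanDown nums (nums.getD i 0) i - 1 - 1).toNat) 0) (nums.getD i 0))]
    exact List.length_replicate
  rw [← hblen]
  exact fill_sufT B hnn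

-- ===== VERDICT (by name: the statement is the Claim_ definition above) =====
theorem findMaximums_spec : Claim_equal_findMaximums := by
  intro nums _
  show findMaximums nums = findMaximums_alt nums
  exact ports_eq nums
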